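-- pv_equiv track=rewrite | github.com/bpbpublications/Selenium-and-Appium-with-Python | Ch2&13-Python/FinalBookQuestions.py | reverse_sentence_preservingSpacesAndSpecialCharacters
-- ===== SOURCE A (Python) =====
-- def reverse_sentence_preservingSpacesAndSpecialCharacters(sentence):
--     # convert the input string to a list of characters
--     char_list = list(sentence)
--
--     # define two pointers i and j, pointing to the start and end of the list respectively
--     i = 0
--     j = len(char_list) - 1
--
--     # loop until the pointers meet or cross each other
--     while i < j:
--         # if the character at index i is not a letter, move the pointer to the right
--         if not char_list[i].isalpha():
--             i += 1
--         # if the character at index j is not a letter, move the pointer to the left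
--         elif not char_list[j].isalpha():
--             j -= 1
--         # if both characters at i and j are letters, swap them and move the pointers towards each other
--         else:
--             char_list[i], char_list[j] = char_list[j], char_list[i]
--             i += 1
--             j -= 1
--
--     # join the characters in the list back into a string
--     return ''.join(char_list)
-- ===== SOURCE B (Python) =====
-- def reverse_sentence_preservingSpacesAndSpecialCharacters(sentence):
--     # collect the letters, reverse them, then re-interleave in one forward pass
--     rev = [c for c in sentence if c.isalpha()][::-1]
--     it = iter(rev)
--     return ''.join(next(it) if c.isalpha() else c for c in sentence)
-- ===== Notes on version B (the rewrite author's own statement) =====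
-- stated objective: simpler
-- what changed: Replaces the converging two-pointer in-place swap loop with extract-the-letters, reverse, and a single forward pass that re-interleaves the reversed letters at alphabetic positions.
import Mathlib
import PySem

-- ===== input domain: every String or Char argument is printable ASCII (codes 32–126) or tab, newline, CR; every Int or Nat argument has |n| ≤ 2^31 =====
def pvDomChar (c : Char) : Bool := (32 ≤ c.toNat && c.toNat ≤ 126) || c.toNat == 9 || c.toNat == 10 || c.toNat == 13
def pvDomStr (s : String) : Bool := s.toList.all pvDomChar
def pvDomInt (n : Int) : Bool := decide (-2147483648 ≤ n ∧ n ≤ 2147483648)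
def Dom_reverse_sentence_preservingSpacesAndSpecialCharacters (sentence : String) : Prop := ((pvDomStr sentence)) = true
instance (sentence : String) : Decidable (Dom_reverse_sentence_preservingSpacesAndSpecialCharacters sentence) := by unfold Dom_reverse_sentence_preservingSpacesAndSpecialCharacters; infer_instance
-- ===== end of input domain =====

-- B replaces A's converging two-pointer swap loop by extract-letters / reverse / one forward
-- re-interleaving pass (objective: simpler; same cost).

-- ===== PORT A =====
-- the while loop: recursion on (j - i).toNat.  All index accesses are in range whenever
-- reached from the entry call (0 ≤ i < j ≤ len-1), so the .getD / pySetD total forms are exact here.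
def pvLoopA (l : List Char) (i j : Int) : List Char :=
  if i < j then
    let ci := (PySem.List.pyGet? l i).getD ' '
    if ¬ PySem.Chars.isalpha ci then pvLoopA l (i + 1) j
    else
      let cj := (PySem.List.pyGet? l j).getD ' '
      if ¬ PySem.Chars.isalpha cj then pvLoopA l i (j - 1)
      else pvLoopA (PySem.List.pySetD (PySem.List.pySetD l i cj) j ci) (i + 1) (j - 1)
  else l
termination_by (j - i).toNat
decreasing_by all_goals omega

def reverse_sentence_preservingSpacesAndSpecialCharacters (sentence : String) : String :=
  String.mk (pvLoopA sentence.toList 0 ((sentence.toList.length : Int) - 1))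

-- ===== PORT B =====
-- the generator ''.join(next(it) if c.isalpha() else c for c in sentence): next(it) never
-- exhausts rev (one letter per alphabetic position), so .headD/.tail are exact here.
def pvFill (cs : List Char) (rev : List Char) : List Char :=
  match cs with
  | [] => []
  | c :: rest =>
    if PySem.Chars.isalpha c then rev.headD ' ' :: pvFill rest rev.tail
    else c :: pvFill rest rev

def reverse_sentence_preservingSpacesAndSpecialCharacters_alt (sentence : String) : String :=
  String.mk (pvFill sentence.toList ((sentence.toList.filter PySem.Chars.isalpha).reverse))

-- ===== PRECONDITION & SPEC =====
def Spec_reverse_sentence_preservingSpacesAndSpecialCharacters (sentence : String) (out : String) : Prop := out = reverse_sentence_preservingSpacesAndSpecialCharacters_alt sentence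
instance (sentence : String) (out : String) : Decidable (Spec_reverse_sentence_preservingSpacesAndSpecialCharacters sentence out) := by unfold Spec_reverse_sentence_preservingSpacesAndSpecialCharacters; infer_instance

-- ===== CLAIM (what is proved, stated in full; the proofs are below) =====
def Claim_equal_reverse_sentence_preservingSpacesAndSpecialCharacters : Prop := ∀ (sentence : String), Dom_reverse_sentence_preservingSpacesAndSpecialCharacters sentence → Spec_reverse_sentence_preservingSpacesAndSpecialCharacters sentence (reverse_sentence_preservingSpacesAndSpecialCharacters sentence)

-- ===== LEMMAS AND PROOFS =====

lemma pvFill_append (a b rev : List Char) :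
    pvFill (a ++ b) rev = pvFill a rev ++ pvFill b (rev.drop (a.countP PySem.Chars.isalpha)) := by
  induction a generalizing rev with
  | nil => simp [pvFill]
  | cons c rest ih =>
    by_cases h : PySem.Chars.isalpha c
    · simp [pvFill, h, ih]
    · simp [pvFill, h, ih]

lemma pvFill_extra (a L E : List Char) (h : a.countP PySem.Chars.isalpha ≤ L.length) :
    pvFill a (L ++ E) = pvFill a L := by
  induction a generalizing L with
  | nil => rfl
  | cons c rest ih =>
    by_cases hc : PySem.Chars.isalpha c
    · cases L with
      | nil => simp [hc] at h
      | cons z L' =>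
        simp only [List.countP_cons, hc, if_pos] at h
        simp [pvFill, hc, ih L' (by simpa using h)]
    · simp [pvFill, hc, ih L (by simpa [List.countP_cons, hc] using h)]

lemma pv_get_mid (p m s : List Char) (k : Nat) (hk : k < m.length) :
    (p ++ m ++ s)[p.length + k]? = m[k]? := by
  rw [List.append_assoc, List.getElem?_append_right (by omega)]
  simp [List.getElem?_append_left hk]

lemma pv_set_mid (p m s : List Char) (k : Nat) (hk : k < m.length) (v : Char) :
    (p ++ m ++ s).set (p.length + k) v = p ++ m.set k v ++ s := by
  rw [List.append_assoc, List.set_append_right _ _ (by omega), List.append_assoc]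
  congr 1
  simp only [Nat.add_sub_cancel_left]
  rw [List.set_append_left _ _ hk]

lemma pvLoopA_eq (n : Nat) : ∀ (m p s : List Char), m.length = n →
    pvLoopA (p ++ m ++ s) (p.length : Int) ((p.length : Int) + m.length - 1)
      = p ++ pvFill m ((m.filter PySem.Chars.isalpha).reverse) ++ s := by
  induction n using Nat.strong_induction_on with
  | _ n ih =>
    intro m p s hm
    cases m with
    | nil =>
      rw [pvLoopA]
      simp [pvFill]
    | cons x t =>
      rcases List.eq_nil_or_concat t with rfl | ⟨mid, y, rfl⟩
      · rw [pvLoopA]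
        rw [if_neg (by simp)]
        by_cases hx : PySem.Chars.isalpha x <;> simp [pvFill, hx]
      · simp only [List.concat_eq_append] at hm ⊢
        have hn : n = mid.length + 2 := by simpa using hm.symm
        have hget0 : PySem.List.pyGet? (p ++ (x :: (mid ++ [y])) ++ s) (p.length : Int) = some x := by
          rw [PySem.List.pyGet?_natCast]
          have h0 := pv_get_mid p (x :: (mid ++ [y])) s 0 (by simp)
          simpa using h0
        have hjcast : (p.length : Int) + ((x :: (mid ++ [y])).length : Int) - 1
            = ((p.length + (mid.length + 1) : Nat) : Int) := by push_cast; simp; ring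
        have hgetj : PySem.List.pyGet? (p ++ (x :: (mid ++ [y])) ++ s)
            ((p.length + (mid.length + 1) : Nat) : Int) = some y := by
          rw [PySem.List.pyGet?_natCast]
          have hj := pv_get_mid p (x :: (mid ++ [y])) s (mid.length + 1) (by simp)
          rw [hj]
          simp
        rw [pvLoopA, hjcast, if_pos (by push_cast; omega), hget0]
        simp only [Option.getD_some, hgetj]
        by_cases hx : PySem.Chars.isalpha x
        · by_cases hy : PySem.Chars.isalpha y
          · -- swap branch
            rw [if_neg (by simp [hx]), if_neg (by simp [hy])]
            have hset : PySem.List.pySetD (PySem.List.pySetD (p ++ (x :: (mid ++ [y])) ++ s) (p.length : Int) y) ((p.length + (mid.length + 1) : Nat) : Int) x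
                = p ++ (y :: (mid ++ [x])) ++ s := by
              rw [PySem.List.pySetD_natCast, PySem.List.pySetD_natCast]
              have h1 : (p ++ (x :: (mid ++ [y])) ++ s).set p.length y = p ++ (y :: (mid ++ [y])) ++ s := by
                have := pv_set_mid p (x :: (mid ++ [y])) s 0 (by simp) y
                simpa using this
              rw [h1]
              have h2 := pv_set_mid p (y :: (mid ++ [y])) s (mid.length + 1) (by simp) x
              rw [h2]
              congr 2
              simp
            rw [hset]
            have hrec := ih (mid.length) (by omega) mid (p ++ [y]) ([x] ++ s) rfl
            have hL : (p ++ [y]) ++ mid ++ ([x] ++ s) = p ++ (y :: (mid ++ [x])) ++ s := by simp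
            have hi : ((p ++ [y]).length : Int) = (p.length : Int) + 1 := by simp
            have hj2 : ((p ++ [y]).length : Int) + (mid.length : Int) - 1
                = ((p.length + (mid.length + 1) : Nat) : Int) - 1 := by push_cast; simp; ring
            rw [hL, hj2, hi] at hrec
            rw [hrec]
            -- RHS computation
            have hfilter : List.filter PySem.Chars.isalpha (x :: (mid ++ [y]))
                = x :: (List.filter PySem.Chars.isalpha mid ++ [y]) := by
              simp [List.filter_append, hx, hy]
            have hcount : mid.countP PySem.Chars.isalpha = (List.filter PySem.Chars.isalpha mid).reverse.length := by
              exact List.countP_eq_length_filter.trans (by simp)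
            rw [hfilter]
            have hrev : (x :: (List.filter PySem.Chars.isalpha mid ++ [y])).reverse
                = ([y] ++ (List.filter PySem.Chars.isalpha mid).reverse) ++ [x] := by simp
            rw [hrev]
            have hdrop : (((List.filter PySem.Chars.isalpha mid).reverse ++ [x]).drop (mid.countP PySem.Chars.isalpha)) = [x] := by
              rw [hcount, List.drop_append_of_le_length (by omega)]
              simp
            have hstep : pvFill (x :: (mid ++ [y])) (([y] ++ (List.filter PySem.Chars.isalpha mid).reverse) ++ [x])
                = y :: pvFill (mid ++ [y]) ((List.filter PySem.Chars.isalpha mid).reverse ++ [x]) := by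
              simp [pvFill, hx]
            have h2 : pvFill (mid ++ [y]) ((List.filter PySem.Chars.isalpha mid).reverse ++ [x])
                = pvFill mid ((List.filter PySem.Chars.isalpha mid).reverse) ++ [x] := by
              rw [pvFill_append, pvFill_extra _ _ _ (le_of_eq hcount), hdrop]
              simp [pvFill, hy]
            rw [hstep, h2]
            simp
          · -- y not alpha: j -= 1
            rw [if_neg (by simp [hx]), if_pos (by simp [hy])]
            have hrec := ih (mid.length + 1) (by omega) (x :: mid) p ([y] ++ s) (by simp)
            have hL : p ++ (x :: mid) ++ ([y] ++ s) = p ++ (x :: (mid ++ [y])) ++ s := by simp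
            have hj2 : (p.length : Int) + ((x :: mid).length : Int) - 1
                = ((p.length + (mid.length + 1) : Nat) : Int) - 1 := by push_cast; simp
            rw [hL, hj2] at hrec
            rw [hrec]
            have hfilter : List.filter PySem.Chars.isalpha (x :: (mid ++ [y]))
                = List.filter PySem.Chars.isalpha (x :: mid) := by
              simp [List.filter_append, hx, hy]
            have hfill : pvFill (x :: (mid ++ [y])) ((List.filter PySem.Chars.isalpha (x :: mid)).reverse)
                = pvFill (x :: mid) ((List.filter PySem.Chars.isalpha (x :: mid)).reverse) ++ [y] := by
              have := pvFill_append (x :: mid) [y] ((List.filter PySem.Chars.isalpha (x :: mid)).reverse)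
              simpa [pvFill, hy] using this
            rw [hfilter, hfill]
            simp
        · -- x not alpha: i += 1
          rw [if_pos (by simp [hx])]
          have hrec := ih (mid.length + 1) (by omega) (mid ++ [y]) (p ++ [x]) s (by simp)
          have hL : (p ++ [x]) ++ (mid ++ [y]) ++ s = p ++ (x :: (mid ++ [y])) ++ s := by simp
          have hi : ((p ++ [x]).length : Int) = (p.length : Int) + 1 := by simp
          have hj2 : ((p ++ [x]).length : Int) + ((mid ++ [y]).length : Int) - 1
              = ((p.length + (mid.length + 1) : Nat) : Int) := by push_cast; simp; ring
          rw [hL, hj2, hi] at hrec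
          rw [hrec]
          have hfilter : List.filter PySem.Chars.isalpha (x :: (mid ++ [y]))
              = List.filter PySem.Chars.isalpha (mid ++ [y]) := by
            simp [hx]
          simp [pvFill, hx, hfilter]

-- ===== VERDICT (by name: the statement is the Claim_ definition above) =====
theorem reverse_sentence_preservingSpacesAndSpecialCharacters_spec : Claim_equal_reverse_sentence_preservingSpacesAndSpecialCharacters := by
  intro s _
  show _ = _
  unfold reverse_sentence_preservingSpacesAndSpecialCharacters reverse_sentence_preservingSpacesAndSpecialCharacters_alt
  have h := pvLoopA_eq s.toList.length s.toList [] [] rfl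
  exact congrArg String.mk (by simpa using h)
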